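-- pv_equiv track=rewrite | github.com/sh-in/aist_kadaikaiketu | 課題02_宮下/dijkstra.py | count_teleport
-- ===== SOURCE A (Python) =====
-- import heapq
--
-- def dijkstra_(graph, start, goal):
--     queue = [(0, start, [])] # ヒープは第一要素でソートされる
--     seen = set()
--     while queue:
--         (cost, node, path) = heapq.heappop(queue)
--         if node in seen:
--             continue
--         path = path + [node]
--         seen.add(node)
--         if node == goal:
--             return path
--         for next_node, weight in graph.get(node, []):
--             if next_node not in seen:
--                 heapq.heappush(queue, (cost + weight, next_node, path))
--     raise ValueError(f"No path found {start} => {goal}")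
--
-- def count_teleport(start_node, goal_node, scene, target): # idが不明の部屋については部屋名+scene_idをとりあえず入力
--     if scene == 1:
--         graph = {
--             'bathroom11_scene1': [('bedroom75_scene1', 1), ('toilet46_scene1', 1)],
--             'toilet46_scene1': [('bathroom11_scene1', 1)],
--             'bedroom75_scene1': [('bathroom11_scene1', 1), ('kitchen209_scene1', 1)],
--             'kitchen209_scene1': [('bedroom75_scene1', 1), ('livingroom342_scene1', 1)],
--             'livingroom342_scene1': [('kitchen209_scene1', 1)]
--         }
--     elif scene == 2:
--         graph = {
--             'livingroom274_scene2': [('kitchen51_scene2', 1)],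
--             'kitchen51_scene2': [('livingroom274_scene2', 1), ('bedroom197_scene2', 1), ('bathroom11_scene2', 1)],
--             'bedroom197_scene2': [('kitchen51_scene2', 1)],
--             'bathroom11_scene2': [('kitchen51_scene2', 1), ('toilet_scene2', 1)],
--             'toilet_scene2': [('bathroom11_scene2', 1)]
--         }
--     elif scene == 3:
--         graph = {
--             'bedroom_scene3': [('livingroom194_scene3', 1)],
--             'livingroom194_scene3': [('bedroom_scene3', 1), ('kitchen11_scene3', 1)],
--             'kitchen11_scene3': [('livingroom194_scene3', 1), ('bedroom358_scene3', 1)],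
--             'bedroom358_scene3': [('kitchen11_scene3', 1), ('bathroom297_scene3', 1)],
--             'bathroom297_scene3': [('bedroom358_scene3', 1), ('toilet333_scene3', 1)],
--             'toilet333_scene3': [('bathroom297_scene3', 1)]
--         }
--     elif scene == 4:
--         graph = {
--             'toilet193_scene4': [('bathroom177_scene4', 1)],
--             'bathroom177_scene4': [('toilet193_scene4', 1), ('kitchen11_scene4', 1)],
--             'kitchen11_scene4': [('bathroom177_scene4', 1), ('bedroom216_scene4', 1)],
--             'bedroom216_scene4': [('kitchen11_scene4', 1), ('livingroom274_scene4', 1)],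
--             'livingroom274_scene4': [('bedroom216_scene4', 1)]
--         }
--     elif scene == 5:
--         graph = {
--             'toilet315_scene5': [('bathroom295_scene5', 1)],
--             'bathroom295_scene5': [('toilet315_scene5', 1), ('livingroom11_scene5', 1)],
--             'livingroom11_scene5': [('bathroom295_scene5', 1), ('kitchen112_scene5', 1)],
--             'kitchen112_scene5': [('livingroom11_scene5', 1), ('bedroom231_scene5', 1)],
--             'bedroom231_scene5': [('kitchen112_scene5', 1)]
--         }
--     elif scene == 6:
--         graph = {
--             'kitchen161_scene6': [('bedroom70_scene6', 1)],
--             'bedroom70_scene6': [('kitchen161_scene6', 1), ('livingroom260_scene6', 1), ('bathroom11_scene6', 1)],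
--             'livingroom260_scene6': [('bedroom70_scene6', 1)],
--             'bathroom11_scene6': [('bedroom70_scene6', 1), ('toilet46_scene6', 1)],
--             'toilet46_scene6': [('bathroom11_scene6', 1)]
--         }
--     elif scene == 7:
--         graph = {
--             'bedroom_scene7': [('kitchen56_scene7', 1)],
--             'kitchen56_scene7': [('bedroom_scene7', 1), ('bathroom11_scene7', 1), ('livingroom205_scene7', 1)],
--             'bathroom11_scene7': [('kitchen56_scene7', 1), ('toilet_scene7', 1)],
--             'toilet_scene7': [('bathroom11_scene7', 1)],
--             'livingroom205_scene7': [('kitchen56_scene7', 1)]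
--         }
--     else:
--         raise NotImplementedError('Not implemented yet')
--
--     # 初回の推論では、回数のカウントが不要なため、0を返す
--     if start_node is None:
--         return 0
--     shortest_path = dijkstra_(graph, start_node, goal_node)
--     for room in shortest_path[1:]:
--         if target in room: # 例: kitchen in kitchen209_scene1
--             return 1
--     return 0
-- ===== SOURCE B (Python) =====
-- SCENE_EDGES = {
--     1: [('bathroom11_scene1', 'bedroom75_scene1'), ('bathroom11_scene1', 'toilet46_scene1'),
--         ('bedroom75_scene1', 'kitchen209_scene1'), ('kitchen209_scene1', 'livingroom342_scene1')],
--     2: [('livingroom274_scene2', 'kitchen51_scene2'), ('kitchen51_scene2', 'bedroom197_scene2'),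
--         ('kitchen51_scene2', 'bathroom11_scene2'), ('bathroom11_scene2', 'toilet_scene2')],
--     3: [('bedroom_scene3', 'livingroom194_scene3'), ('livingroom194_scene3', 'kitchen11_scene3'),
--         ('kitchen11_scene3', 'bedroom358_scene3'), ('bedroom358_scene3', 'bathroom297_scene3'),
--         ('bathroom297_scene3', 'toilet333_scene3')],
--     4: [('toilet193_scene4', 'bathroom177_scene4'), ('bathroom177_scene4', 'kitchen11_scene4'),
--         ('kitchen11_scene4', 'bedroom216_scene4'), ('bedroom216_scene4', 'livingroom274_scene4')],
--     5: [('toilet315_scene5', 'bathroom295_scene5'), ('bathroom295_scene5', 'livingroom11_scene5'),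
--         ('livingroom11_scene5', 'kitchen112_scene5'), ('kitchen112_scene5', 'bedroom231_scene5')],
--     6: [('kitchen161_scene6', 'bedroom70_scene6'), ('bedroom70_scene6', 'livingroom260_scene6'),
--         ('bedroom70_scene6', 'bathroom11_scene6'), ('bathroom11_scene6', 'toilet46_scene6')],
--     7: [('bedroom_scene7', 'kitchen56_scene7'), ('kitchen56_scene7', 'bathroom11_scene7'),
--         ('kitchen56_scene7', 'livingroom205_scene7'), ('bathroom11_scene7', 'toilet_scene7')],
-- }
--
-- def find_path_(edges, start, goal):
--     # every scene graph is a tree, so the unique path found by DFS is the shortest path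
--     def dfs(node, prev):
--         if node == goal:
--             return [node]
--         for a, b in edges:
--             if a == node:
--                 nxt = b
--             elif b == node:
--                 nxt = a
--             else:
--                 continue
--             if nxt == prev:
--                 continue
--             sub = dfs(nxt, node)
--             if sub is not None:
--                 return [node] + sub
--         return None
--     path = dfs(start, None)
--     if path is None:
--         raise ValueError(f"No path found {start} => {goal}")
--     return path
--
-- def count_teleport(start_node, goal_node, scene, target):
--     edges = SCENE_EDGES.get(scene)
--     if edges is None:
--         raise NotImplementedError('Not implemented yet')
--     if start_node is None:
--         return 0
--     path = find_path_(edges, start_node, goal_node)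
--     return 1 if any(target in room for room in path[1:]) else 0
-- ===== Notes on version B (the rewrite author's own statement) =====
-- stated objective: simpler
-- what changed: Replaces the heapq Dijkstra over per-node adjacency dicts with a recursive DFS over each scene's undirected edge list (each edge stored once); since every scene graph is a tree, the unique DFS path is the shortest path, and the heap, cost bookkeeping and per-entry path copies disappear.
import Mathlib
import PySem

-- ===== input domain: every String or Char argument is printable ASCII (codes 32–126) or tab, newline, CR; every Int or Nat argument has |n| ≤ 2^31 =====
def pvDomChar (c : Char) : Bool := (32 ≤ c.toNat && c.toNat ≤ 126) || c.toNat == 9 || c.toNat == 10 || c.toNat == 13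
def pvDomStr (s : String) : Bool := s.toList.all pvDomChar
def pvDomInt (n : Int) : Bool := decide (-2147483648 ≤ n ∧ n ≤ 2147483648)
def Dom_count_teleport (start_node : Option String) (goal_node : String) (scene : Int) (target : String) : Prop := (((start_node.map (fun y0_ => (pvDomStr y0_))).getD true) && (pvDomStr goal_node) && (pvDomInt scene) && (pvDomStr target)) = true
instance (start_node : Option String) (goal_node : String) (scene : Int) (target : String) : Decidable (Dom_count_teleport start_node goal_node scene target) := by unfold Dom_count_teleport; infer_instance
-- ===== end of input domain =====

-- B replaces the heapq Dijkstra over adjacency dicts with a recursive DFS over each scene's undirected edge list (each edge stored once); on these tree graphs the unique DFS path is the shortest path; objective: simpler.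


-- ===== PORT A =====
-- A's scene graphs: per-node adjacency dicts, exactly as written in the Python.
def pvG1 : PySem.Dict String (List (String × Int)) := PySem.Dict.ofList [("bathroom11_scene1", [("bedroom75_scene1", 1), ("toilet46_scene1", 1)]), ("toilet46_scene1", [("bathroom11_scene1", 1)]), ("bedroom75_scene1", [("bathroom11_scene1", 1), ("kitchen209_scene1", 1)]), ("kitchen209_scene1", [("bedroom75_scene1", 1), ("livingroom342_scene1", 1)]), ("livingroom342_scene1", [("kitchen209_scene1", 1)])]
def pvG2 : PySem.Dict String (List (String × Int)) := PySem.Dict.ofList [("livingroom274_scene2", [("kitchen51_scene2", 1)]), ("kitchen51_scene2", [("livingroom274_scene2", 1), ("bedroom197_scene2", 1), ("bathroom11_scene2", 1)]), ("bedroom197_scene2", [("kitchen51_scene2", 1)]), ("bathroom11_scene2", [("kitchen51_scene2", 1), ("toilet_scene2", 1)]), ("toilet_scene2", [("bathroom11_scene2", 1)])]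
def pvG3 : PySem.Dict String (List (String × Int)) := PySem.Dict.ofList [("bedroom_scene3", [("livingroom194_scene3", 1)]), ("livingroom194_scene3", [("bedroom_scene3", 1), ("kitchen11_scene3", 1)]), ("kitchen11_scene3", [("livingroom194_scene3", 1), ("bedroom358_scene3", 1)]), ("bedroom358_scene3", [("kitchen11_scene3", 1), ("bathroom297_scene3", 1)]), ("bathroom297_scene3", [("bedroom358_scene3", 1), ("toilet333_scene3", 1)]), ("toilet333_scene3", [("bathroom297_scene3", 1)])]
def pvG4 : PySem.Dict String (List (String × Int)) := PySem.Dict.ofList [("toilet193_scene4", [("bathroom177_scene4", 1)]), ("bathroom177_scene4", [("toilet193_scene4", 1), ("kitchen11_scene4", 1)]), ("kitchen11_scene4", [("bathroom177_scene4", 1), ("bedroom216_scene4", 1)]), ("bedroom216_scene4", [("kitchen11_scene4", 1), ("livingroom274_scene4", 1)]), ("livingroom274_scene4", [("bedroom216_scene4", 1)])]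
def pvG5 : PySem.Dict String (List (String × Int)) := PySem.Dict.ofList [("toilet315_scene5", [("bathroom295_scene5", 1)]), ("bathroom295_scene5", [("toilet315_scene5", 1), ("livingroom11_scene5", 1)]), ("livingroom11_scene5", [("bathroom295_scene5", 1), ("kitchen112_scene5", 1)]), ("kitchen112_scene5", [("livingroom11_scene5", 1), ("bedroom231_scene5", 1)]), ("bedroom231_scene5", [("kitchen112_scene5", 1)])]
def pvG6 : PySem.Dict String (List (String × Int)) := PySem.Dict.ofList [("kitchen161_scene6", [("bedroom70_scene6", 1)]), ("bedroom70_scene6", [("kitchen161_scene6", 1), ("livingroom260_scene6", 1), ("bathroom11_scene6", 1)]), ("livingroom260_scene6", [("bedroom70_scene6", 1)]), ("bathroom11_scene6", [("bedroom70_scene6", 1), ("toilet46_scene6", 1)]), ("toilet46_scene6", [("bathroom11_scene6", 1)])]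
def pvG7 : PySem.Dict String (List (String × Int)) := PySem.Dict.ofList [("bedroom_scene7", [("kitchen56_scene7", 1)]), ("kitchen56_scene7", [("bedroom_scene7", 1), ("bathroom11_scene7", 1), ("livingroom205_scene7", 1)]), ("bathroom11_scene7", [("kitchen56_scene7", 1), ("toilet_scene7", 1)]), ("toilet_scene7", [("bathroom11_scene7", 1)]), ("livingroom205_scene7", [("kitchen56_scene7", 1)])]

-- scene -> graph dict; none where A raises NotImplementedError (excluded by Pre_)
def pvGraph (scene : Int) : Option (PySem.Dict String (List (String × Int))) :=
  if scene == 1 then some pvG1 else if scene == 2 then some pvG2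
  else if scene == 3 then some pvG3 else if scene == 4 then some pvG4
  else if scene == 5 then some pvG5 else if scene == 6 then some pvG6
  else if scene == 7 then some pvG7 else none

-- Python string `<`: code-point lexicographic (exact for the ASCII domain)
def pvChLt : List Char → List Char → Bool
  | [], [] => false
  | [], _ :: _ => true
  | _ :: _, [] => false
  | a :: as, b :: bs =>
    if a.toNat < b.toNat then true else if b.toNat < a.toNat then false else pvChLt as bs

def pvStrLt (a b : String) : Bool := pvChLt a.toList b.toList

-- Python tuple comparison (cost, node, path) used by the heap: lexicographic
def pvPathLt : List String → List String → Bool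
  | [], [] => false
  | [], _ :: _ => true
  | _ :: _, [] => false
  | a :: as, b :: bs => if pvStrLt a b then true else if pvStrLt b a then false else pvPathLt as bs

def pvTripLt (a b : Int × String × List String) : Bool :=
  if a.1 < b.1 then true else if b.1 < a.1 then false
  else if pvStrLt a.2.1 b.2.1 then true else if pvStrLt b.2.1 a.2.1 then false
  else pvPathLt a.2.2 b.2.2

-- remove the first occurrence of the popped minimum from the queue
def pvEraseTrip : List (Int × String × List String) → (Int × String × List String) → List (Int × String × List String)
  | [], _ => []
  | x :: xs, m => if x = m then xs else x :: pvEraseTrip xs m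

-- A's final scan: `for room in shortest_path[1:]: if target in room: return 1` / `return 0`
def pvScan : List String → String → Int
  | [], _ => 0
  | r :: rs, t => if PySem.Str.isIn t r then 1 else pvScan rs t

-- dijkstra_ : the while-loop over the heap; heappop = remove the minimum tuple,
-- heappush = add to the queue. Fuel 20 exceeds the total number of pushes possible
-- on these graphs (≤ 1 + 2·edges ≤ 13), so it is never exhausted; [] stands for
-- the ValueError raise (excluded by Pre_).
def pvDijkstraLoop (g : PySem.Dict String (List (String × Int))) (goal : String) :
    Nat → List (Int × String × List String) → PySem.Set String → List String
  | 0, _, _ => []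
  | _ + 1, [], _ => []
  | fuel + 1, h :: t, seen =>
    let m := (h :: t).foldl (fun m x => if pvTripLt x m then x else m) h
    let rest := pvEraseTrip (h :: t) m
    if PySem.Set.contains seen m.2.1 then pvDijkstraLoop g goal fuel rest seen
    else
      let path := m.2.2 ++ [m.2.1]
      let seen' := PySem.Set.add seen m.2.1
      if m.2.1 == goal then path
      else
        pvDijkstraLoop g goal fuel
          (rest ++ (((PySem.Dict.getD g m.2.1 []).filter
              (fun p => !PySem.Set.contains seen' p.1)).map (fun p => (m.1 + p.2, p.1, path))))
          seen'

def pvDijkstra (g : PySem.Dict String (List (String × Int))) (s goal : String) : List String :=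
  pvDijkstraLoop g goal 20 [(0, s, [])] PySem.Set.empty

def count_teleport (start_node : Option String) (goal_node : String) (scene : Int) (target : String) : Int :=
  match pvGraph scene with
  | none => 0   -- A raises NotImplementedError; outside Pre_
  | some g =>
    match start_node with
    | none => 0
    | some s => pvScan (PySem.List.slice (pvDijkstra g s goal_node) (some 1) none) target

-- ===== PORT B =====
-- B's scene data: each scene's undirected edge list, each edge stored once.
def pvE1 : List (String × String) := [("bathroom11_scene1", "bedroom75_scene1"), ("bathroom11_scene1", "toilet46_scene1"), ("bedroom75_scene1", "kitchen209_scene1"), ("kitchen209_scene1", "livingroom342_scene1")]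
def pvE2 : List (String × String) := [("livingroom274_scene2", "kitchen51_scene2"), ("kitchen51_scene2", "bedroom197_scene2"), ("kitchen51_scene2", "bathroom11_scene2"), ("bathroom11_scene2", "toilet_scene2")]
def pvE3 : List (String × String) := [("bedroom_scene3", "livingroom194_scene3"), ("livingroom194_scene3", "kitchen11_scene3"), ("kitchen11_scene3", "bedroom358_scene3"), ("bedroom358_scene3", "bathroom297_scene3"), ("bathroom297_scene3", "toilet333_scene3")]
def pvE4 : List (String × String) := [("toilet193_scene4", "bathroom177_scene4"), ("bathroom177_scene4", "kitchen11_scene4"), ("kitchen11_scene4", "bedroom216_scene4"), ("bedroom216_scene4", "livingroom274_scene4")]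
def pvE5 : List (String × String) := [("toilet315_scene5", "bathroom295_scene5"), ("bathroom295_scene5", "livingroom11_scene5"), ("livingroom11_scene5", "kitchen112_scene5"), ("kitchen112_scene5", "bedroom231_scene5")]
def pvE6 : List (String × String) := [("kitchen161_scene6", "bedroom70_scene6"), ("bedroom70_scene6", "livingroom260_scene6"), ("bedroom70_scene6", "bathroom11_scene6"), ("bathroom11_scene6", "toilet46_scene6")]
def pvE7 : List (String × String) := [("bedroom_scene7", "kitchen56_scene7"), ("kitchen56_scene7", "bathroom11_scene7"), ("kitchen56_scene7", "livingroom205_scene7"), ("bathroom11_scene7", "toilet_scene7")]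

-- SCENE_EDGES.get(scene); none where B raises NotImplementedError (excluded by Pre_)
def pvEdges (scene : Int) : Option (List (String × String)) :=
  if scene == 1 then some pvE1 else if scene == 2 then some pvE2
  else if scene == 3 then some pvE3 else if scene == 4 then some pvE4
  else if scene == 5 then some pvE5 else if scene == 6 then some pvE6
  else if scene == 7 then some pvE7 else none

-- dfs(node, prev): the for-loop with early return is List.findSome? over the edge
-- list; fuel 20 exceeds the DFS depth (≤ number of rooms ≤ 6, since the graphs are
-- trees and a child never revisits its parent).
def pvDfs (E : List (String × String)) (goal : String) : Nat → String → Option String → Option (List String)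
  | 0, _, _ => none
  | fuel + 1, node, prev =>
    if node == goal then some [node]
    else
      E.findSome? (fun e =>
        if e.1 == node then
          (if some e.2 == prev then none
           else (pvDfs E goal fuel e.2 (some node)).map (fun sub => node :: sub))
        else if e.2 == node then
          (if some e.1 == prev then none
           else (pvDfs E goal fuel e.1 (some node)).map (fun sub => node :: sub))
        else none)

def count_teleport_alt (start_node : Option String) (goal_node : String) (scene : Int) (target : String) : Int :=
  match pvEdges scene with
  | none => 0   -- raise NotImplementedError; outside Pre_
  | some E =>
    match start_node with
    | none => 0
    | some s =>
      match pvDfs E goal_node 20 s none with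
      | none => 0   -- raise ValueError; outside Pre_
      | some path =>
        if (PySem.List.slice path (some 1) none).any (fun room => PySem.Str.isIn target room) then 1 else 0

-- ===== PRECONDITION & SPEC =====
def pvN1 : List String := ["bathroom11_scene1", "toilet46_scene1", "bedroom75_scene1", "kitchen209_scene1", "livingroom342_scene1"]
def pvN2 : List String := ["livingroom274_scene2", "kitchen51_scene2", "bedroom197_scene2", "bathroom11_scene2", "toilet_scene2"]
def pvN3 : List String := ["bedroom_scene3", "livingroom194_scene3", "kitchen11_scene3", "bedroom358_scene3", "bathroom297_scene3", "toilet333_scene3"]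
def pvN4 : List String := ["toilet193_scene4", "bathroom177_scene4", "kitchen11_scene4", "bedroom216_scene4", "livingroom274_scene4"]
def pvN5 : List String := ["toilet315_scene5", "bathroom295_scene5", "livingroom11_scene5", "kitchen112_scene5", "bedroom231_scene5"]
def pvN6 : List String := ["kitchen161_scene6", "bedroom70_scene6", "livingroom260_scene6", "bathroom11_scene6", "toilet46_scene6"]
def pvN7 : List String := ["bedroom_scene7", "kitchen56_scene7", "bathroom11_scene7", "toilet_scene7", "livingroom205_scene7"]

def pvNodes (scene : Int) : List String :=
  if scene == 1 then pvN1 else if scene == 2 then pvN2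
  else if scene == 3 then pvN3 else if scene == 4 then pvN4
  else if scene == 5 then pvN5 else if scene == 6 then pvN6
  else if scene == 7 then pvN7 else []

-- Pre_ admits exactly the inputs on which A returns: scene must be 1..7 (else
-- NotImplementedError) and, unless start_node is None or equals goal_node, both
-- endpoints must be rooms of that scene (else dijkstra_ raises ValueError).
def Pre_count_teleport (start_node : Option String) (goal_node : String) (scene : Int) (target : String) : Prop :=
  (1 ≤ scene ∧ scene ≤ 7) ∧
  (start_node = none ∨ start_node = some goal_node ∨
    ((∃ s ∈ pvNodes scene, start_node = some s) ∧ goal_node ∈ pvNodes scene))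
instance (start_node : Option String) (goal_node : String) (scene : Int) (target : String) : Decidable (Pre_count_teleport start_node goal_node scene target) := by unfold Pre_count_teleport; infer_instance
def pvWitness_count_teleport : Option String × String × Int × String :=
  (some "bathroom11_scene1", "livingroom342_scene1", 1, "kitchen")

def Spec_count_teleport (start_node : Option String) (goal_node : String) (scene : Int) (target : String) (out : Int) : Prop := out = count_teleport_alt start_node goal_node scene target
instance (start_node : Option String) (goal_node : String) (scene : Int) (target : String) (out : Int) : Decidable (Spec_count_teleport start_node goal_node scene target out) := by unfold Spec_count_teleport; infer_instance

-- ===== CLAIM (what is proved, stated in full; the proofs are below) =====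
def Claim_equal_count_teleport : Prop := ∀ (start_node : Option String) (goal_node : String) (scene : Int) (target : String), Dom_count_teleport start_node goal_node scene target → Pre_count_teleport start_node goal_node scene target → Spec_count_teleport start_node goal_node scene target (count_teleport start_node goal_node scene target)

-- ===== LEMMAS AND PROOFS =====
theorem pvDijkstra_self (g : PySem.Dict String (List (String × Int))) (s : String) :
    pvDijkstra g s s = [s] := by
  show pvDijkstraLoop g s (19+1) [(0, s, [])] PySem.Set.empty = [s]
  simp [pvDijkstraLoop, PySem.Set.contains, PySem.Set.empty]

theorem pvDfs_self (E : List (String × String)) (s : String) :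
    pvDfs E s 20 s none = some [s] := by
  show pvDfs E s (19+1) s none = some [s]
  simp [pvDfs]

-- A's scan equals B's `any` expression
theorem pvScan_eq_any (l : List String) (t : String) :
    pvScan l t = (if l.any (fun room => PySem.Str.isIn t room) then 1 else 0) := by
  induction l with
  | nil => simp [pvScan]
  | cons r rs ih =>
    simp only [pvScan, List.any_cons]
    by_cases h : PySem.Str.isIn t r = true
    · rw [if_pos h]; simp only [h, Bool.true_or, if_true]
    · have he : PySem.Str.isIn t r = false := by simpa using h
      rw [if_neg h, ih]; simp only [he, Bool.false_or]

-- bridge: once B's DFS returns exactly A's shortest path, the final scans agree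
theorem pvBridge (g : PySem.Dict String (List (String × Int))) (E : List (String × String))
    (s goal t : String) (h : pvDfs E goal 20 s none = some (pvDijkstra g s goal)) :
    pvScan (PySem.List.slice (pvDijkstra g s goal) (some 1) none) t
      = (match pvDfs E goal 20 s none with
         | none => 0
         | some path => if (PySem.List.slice path (some 1) none).any (fun room => PySem.Str.isIn t room) then (1 : Int) else 0) := by
  rw [h, pvScan_eq_any]

-- DFS and Dijkstra return the same path for every pair of rooms, per scene
set_option maxHeartbeats 8000000 in
theorem pvAll1 : (pvN1.all fun s => pvN1.all fun g =>
    pvDfs pvE1 g 20 s none == some (pvDijkstra pvG1 s g)) = true := by decide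

set_option maxHeartbeats 8000000 in
theorem pvAll2 : (pvN2.all fun s => pvN2.all fun g =>
    pvDfs pvE2 g 20 s none == some (pvDijkstra pvG2 s g)) = true := by decide

set_option maxHeartbeats 8000000 in
theorem pvAll3 : (pvN3.all fun s => pvN3.all fun g =>
    pvDfs pvE3 g 20 s none == some (pvDijkstra pvG3 s g)) = true := by decide

set_option maxHeartbeats 8000000 in
theorem pvAll4 : (pvN4.all fun s => pvN4.all fun g =>
    pvDfs pvE4 g 20 s none == some (pvDijkstra pvG4 s g)) = true := by decide

set_option maxHeartbeats 8000000 in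
theorem pvAll5 : (pvN5.all fun s => pvN5.all fun g =>
    pvDfs pvE5 g 20 s none == some (pvDijkstra pvG5 s g)) = true := by decide

set_option maxHeartbeats 8000000 in
theorem pvAll6 : (pvN6.all fun s => pvN6.all fun g =>
    pvDfs pvE6 g 20 s none == some (pvDijkstra pvG6 s g)) = true := by decide

set_option maxHeartbeats 8000000 in
theorem pvAll7 : (pvN7.all fun s => pvN7.all fun g =>
    pvDfs pvE7 g 20 s none == some (pvDijkstra pvG7 s g)) = true := by decide

theorem pvFin1 (s g t : String) (hs : s ∈ pvN1) (hg : g ∈ pvN1) :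
    count_teleport (some s) g 1 t = count_teleport_alt (some s) g 1 t := by
  have h := eq_of_beq (List.all_eq_true.mp (List.all_eq_true.mp pvAll1 s hs) g hg)
  simpa [count_teleport, count_teleport_alt, pvGraph, pvEdges] using pvBridge pvG1 pvE1 s g t h

theorem pvFin2 (s g t : String) (hs : s ∈ pvN2) (hg : g ∈ pvN2) :
    count_teleport (some s) g 2 t = count_teleport_alt (some s) g 2 t := by
  have h := eq_of_beq (List.all_eq_true.mp (List.all_eq_true.mp pvAll2 s hs) g hg)
  simpa [count_teleport, count_teleport_alt, pvGraph, pvEdges] using pvBridge pvG2 pvE2 s g t h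

theorem pvFin3 (s g t : String) (hs : s ∈ pvN3) (hg : g ∈ pvN3) :
    count_teleport (some s) g 3 t = count_teleport_alt (some s) g 3 t := by
  have h := eq_of_beq (List.all_eq_true.mp (List.all_eq_true.mp pvAll3 s hs) g hg)
  simpa [count_teleport, count_teleport_alt, pvGraph, pvEdges] using pvBridge pvG3 pvE3 s g t h

theorem pvFin4 (s g t : String) (hs : s ∈ pvN4) (hg : g ∈ pvN4) :
    count_teleport (some s) g 4 t = count_teleport_alt (some s) g 4 t := by
  have h := eq_of_beq (List.all_eq_true.mp (List.all_eq_true.mp pvAll4 s hs) g hg)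
  simpa [count_teleport, count_teleport_alt, pvGraph, pvEdges] using pvBridge pvG4 pvE4 s g t h

theorem pvFin5 (s g t : String) (hs : s ∈ pvN5) (hg : g ∈ pvN5) :
    count_teleport (some s) g 5 t = count_teleport_alt (some s) g 5 t := by
  have h := eq_of_beq (List.all_eq_true.mp (List.all_eq_true.mp pvAll5 s hs) g hg)
  simpa [count_teleport, count_teleport_alt, pvGraph, pvEdges] using pvBridge pvG5 pvE5 s g t h

theorem pvFin6 (s g t : String) (hs : s ∈ pvN6) (hg : g ∈ pvN6) :
    count_teleport (some s) g 6 t = count_teleport_alt (some s) g 6 t := by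
  have h := eq_of_beq (List.all_eq_true.mp (List.all_eq_true.mp pvAll6 s hs) g hg)
  simpa [count_teleport, count_teleport_alt, pvGraph, pvEdges] using pvBridge pvG6 pvE6 s g t h

theorem pvFin7 (s g t : String) (hs : s ∈ pvN7) (hg : g ∈ pvN7) :
    count_teleport (some s) g 7 t = count_teleport_alt (some s) g 7 t := by
  have h := eq_of_beq (List.all_eq_true.mp (List.all_eq_true.mp pvAll7 s hs) g hg)
  simpa [count_teleport, count_teleport_alt, pvGraph, pvEdges] using pvBridge pvG7 pvE7 s g t h

-- ===== VERDICT (by name: the statement is the Claim_ definition above) =====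
theorem count_teleport_spec : Claim_equal_count_teleport := by
  intro start_node goal_node scene target _hdom hpre
  unfold Spec_count_teleport
  obtain ⟨⟨h1, h7⟩, hrest⟩ := hpre
  rcases hrest with rfl | rfl | ⟨⟨s, hs, rfl⟩, hg⟩
  · cases hG : pvGraph scene <;> cases hE : pvEdges scene <;>
      simp_all [count_teleport, count_teleport_alt, pvGraph, pvEdges]
  · cases hG : pvGraph scene <;> cases hE : pvEdges scene <;>
      simp_all [count_teleport, count_teleport_alt, pvGraph, pvEdges,
        pvDijkstra_self, pvDfs_self, pvScan, PySem.List.slice]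
  · have hsc : scene = 1 ∨ scene = 2 ∨ scene = 3 ∨ scene = 4 ∨ scene = 5 ∨ scene = 6 ∨ scene = 7 := by omega
    rcases hsc with rfl | rfl | rfl | rfl | rfl | rfl | rfl
    · exact pvFin1 s goal_node target hs hg
    · exact pvFin2 s goal_node target hs hg
    · exact pvFin3 s goal_node target hs hg
    · exact pvFin4 s goal_node target hs hg
    · exact pvFin5 s goal_node target hs hg
    · exact pvFin6 s goal_node target hs hg
    · exact pvFin7 s goal_node target hs hg
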